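-- pv_equiv track=rewrite | github.com/JonaMata/AdventOfCode | 2023/day_14/day_14.py | calc_weight
-- ===== SOURCE A (Python) =====
-- def calc_weight(arr):
--     last_square = -1
--     last_rock = -1
--     weight = 0
--     for i, rock in enumerate(arr):
--         if rock == '#':
--             last_rock = i
--         elif rock == 'O':
--             new_spot = max(last_square, last_rock)+1
--             weight += len(arr)-new_spot
--             last_rock = new_spot
--     return weight
-- ===== SOURCE B (Python) =====
-- def calc_weight(arr):
--     n = len(arr)
--     weight = 0
--     start = 0
--     count = 0
--     for i, rock in enumerate(arr):
--         if rock == '#':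
--             weight += count * (n - start) - count * (count - 1) // 2
--             count = 0
--             start = i + 1
--         elif rock == 'O':
--             count += 1
--     weight += count * (n - start) - count * (count - 1) // 2
--     return weight
-- ===== Notes on version B (the rewrite author's own statement) =====
-- stated objective: alternative
-- what changed: Instead of settling each rock individually via max(last_square,last_rock)+1 and adding its weight one rock at a time, B partitions the column into wall-separated runs and flushes each run's total weight with the closed-form sum k*(n-start) - k*(k-1)//2.
import Mathlib
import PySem

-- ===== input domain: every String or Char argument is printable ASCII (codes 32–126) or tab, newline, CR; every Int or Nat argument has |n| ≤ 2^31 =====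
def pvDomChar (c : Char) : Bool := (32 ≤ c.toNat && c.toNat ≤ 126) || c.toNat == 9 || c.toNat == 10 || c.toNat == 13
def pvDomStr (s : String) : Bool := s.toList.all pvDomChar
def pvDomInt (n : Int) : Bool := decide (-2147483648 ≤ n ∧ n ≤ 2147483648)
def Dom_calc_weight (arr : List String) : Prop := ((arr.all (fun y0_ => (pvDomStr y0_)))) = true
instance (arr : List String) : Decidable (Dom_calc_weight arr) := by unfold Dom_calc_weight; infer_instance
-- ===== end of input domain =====

-- B replaces A's rock-by-rock settling with per-run closed-form sums; same O(n), different decomposition.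

-- ===== PORT A =====
-- loop body of A: state (last_square, last_rock, weight), item (i, rock)
def stepA (n : Int) (st : Int × Int × Int) (p : Int × String) : Int × Int × Int :=
  if p.2 = "#" then (st.1, p.1, st.2.2)
  else if p.2 = "O" then
    let new_spot := max st.1 st.2.1 + 1
    (st.1, new_spot, st.2.2 + (n - new_spot))
  else st

def calc_weight (arr : List String) : Int :=
  ((PySem.List.enumerate arr 0).foldl (stepA (arr.length : Int)) (-1, -1, 0)).2.2

-- ===== PORT B =====
-- loop body of B: state (start, count, weight), item (i, rock)
def stepB (n : Int) (st : Int × Int × Int) (p : Int × String) : Int × Int × Int :=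
  if p.2 = "#" then
    (p.1 + 1, 0, st.2.2 + st.2.1 * (n - st.1) - PySem.Int.floordiv (st.2.1 * (st.2.1 - 1)) 2)
  else if p.2 = "O" then (st.1, st.2.1 + 1, st.2.2)
  else st

def calc_weight_alt (arr : List String) : Int :=
  let n : Int := arr.length
  let st := (PySem.List.enumerate arr 0).foldl (stepB n) (0, 0, 0)
  st.2.2 + st.2.1 * (n - st.1) - PySem.Int.floordiv (st.2.1 * (st.2.1 - 1)) 2

-- ===== PRECONDITION & SPEC =====
def Spec_calc_weight (arr : List String) (out : Int) : Prop := out = calc_weight_alt arr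
instance (arr : List String) (out : Int) : Decidable (Spec_calc_weight arr out) := by unfold Spec_calc_weight; infer_instance

-- ===== CLAIM (what is proved, stated in full; the proofs are below) =====
def Claim_equal_calc_weight : Prop := ∀ (arr : List String), Dom_calc_weight arr → Spec_calc_weight arr (calc_weight arr)

-- ===== LEMMAS AND PROOFS =====

-- half of k*(k-1) is exact (the product is even)
lemma fd_half (k : Int) : 2 * PySem.Int.floordiv (k * (k - 1)) 2 = k * (k - 1) := by
  rw [PySem.Int.floordiv_eq_ediv_of_pos (by norm_num)]
  have h : (2 : Int) ∣ k * (k - 1) := by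
    rcases Int.even_or_odd k with he | ho
    · exact Dvd.dvd.mul_right he.two_dvd _
    · obtain ⟨m, hm⟩ := ho
      exact Dvd.dvd.mul_left ⟨m, by omega⟩ _
  exact Int.mul_ediv_cancel' h

-- loop invariant: A's running weight equals B's running weight plus the pending run's closed form
lemma loop_eq (n : Int) (xs : List String) (i lr w s k w' : Int)
    (hs : 0 ≤ s) (hk : 0 ≤ k) (hi : 0 ≤ i)
    (hlr : lr = s + k - 1)
    (hw : w = w' + k * (n - s) - PySem.Int.floordiv (k * (k - 1)) 2) :
    ((PySem.List.enumerate xs i).foldl (stepA n) (-1, lr, w)).2.2 =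
      (let st := (PySem.List.enumerate xs i).foldl (stepB n) (s, k, w')
       st.2.2 + st.2.1 * (n - st.1) - PySem.Int.floordiv (st.2.1 * (st.2.1 - 1)) 2) := by
  induction xs generalizing i lr w s k w' with
  | nil => simpa using hw
  | cons x xs ih =>
    rw [PySem.List.enumerate_cons, List.foldl_cons, List.foldl_cons]
    by_cases hsq : x = "#"
    · simp only [stepA, stepB, hsq]
      exact ih (i + 1) i _ (i + 1) 0 _ (by omega) le_rfl (by omega) (by ring)
        (by simp [hw])
    · by_cases hO : x = "O"
      · simp only [stepA, stepB, hO, String.reduceEq]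
        have hmax : max (-1) lr = lr := by omega
        rw [hmax]
        refine ih (i + 1) (lr + 1) _ s (k + 1) w' hs (by omega) (by omega) (by omega) ?_
        have e1 := fd_half k
        have e2 := fd_half (k + 1)
        have hm : PySem.Int.floordiv ((k + 1) * (k + 1 - 1)) 2
            = PySem.Int.floordiv (k * (k - 1)) 2 + k := by nlinarith [e1, e2]
        rw [hm]
        rw [hw, hlr]; ring
      · simp only [stepA, stepB, if_neg hsq, if_neg hO]
        exact ih (i + 1) lr w s k w' hs hk (by omega) hlr hw

-- ===== VERDICT (by name: the statement is the Claim_ definition above) =====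
theorem calc_weight_spec : Claim_equal_calc_weight := by
  intro arr _
  unfold Spec_calc_weight calc_weight calc_weight_alt
  exact loop_eq (arr.length : Int) arr 0 (-1) 0 0 0 0 le_rfl le_rfl le_rfl (by ring)
    (by simp [PySem.Int.floordiv])
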